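-- pv_equiv track=rewrite | github.com/Nishantkumar22326/CSE112-B31-project | main.py | check_halt
-- ===== SOURCE A (Python) =====
-- def check_halt(l):
--     line = 1
--     for i in l:
--         v = i.strip()
--         if v == "hlt":
--             if line < len(l):
--                 return -1
--             return 1
--         line += 1
--     return -2
-- ===== SOURCE B (Python) =====
-- def check_halt(l):
--     res, is_last = -2, True
--     for s in reversed(l):
--         if s.strip() == "hlt":
--             res = 1 if is_last else -1
--         is_last = False
--     return res
-- ===== Notes on version B (the rewrite author's own statement) =====
-- stated objective: alternative
-- what changed: Replaces A's forward early-exit scan with a line counter by a reverse-direction fold with no early exit: iterating over reversed(l) with an is_last flag, each later write (an earlier original line) overwrites the result, so the final value reflects the first 'hlt' in original order.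
import Mathlib
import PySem

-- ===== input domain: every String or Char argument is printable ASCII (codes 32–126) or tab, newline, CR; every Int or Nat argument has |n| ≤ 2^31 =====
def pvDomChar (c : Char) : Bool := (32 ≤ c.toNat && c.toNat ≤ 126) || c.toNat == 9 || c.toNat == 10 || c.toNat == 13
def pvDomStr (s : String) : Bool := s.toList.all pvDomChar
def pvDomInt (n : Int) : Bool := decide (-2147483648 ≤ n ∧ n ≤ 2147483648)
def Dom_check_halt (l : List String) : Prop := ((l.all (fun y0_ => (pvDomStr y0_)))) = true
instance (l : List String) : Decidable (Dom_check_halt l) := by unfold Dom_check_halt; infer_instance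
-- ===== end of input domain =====

-- B replaces A's forward early-exit scan by a reverse-direction fold with no early exit
-- (last write wins = first 'hlt' in original order); alternative decomposition, same cost.
-- ===== PORT A =====
def checkHaltLoop (n : Int) : List String → Int → Int
  | [], _ => -2
  | i :: rest, line =>
    if PySem.Str.strip i = "hlt" then
      (if line < n then -1 else 1)
    else checkHaltLoop n rest (line + 1)

def check_halt (l : List String) : Int := checkHaltLoop (l.length : Int) l 1

-- ===== PORT B =====
def checkHaltStep (st : Int × Bool) (s : String) : Int × Bool :=
  (if PySem.Str.strip s = "hlt" then (if st.2 then (1 : Int) else -1) else st.1, false)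

def check_halt_alt (l : List String) : Int :=
  (l.reverse.foldl checkHaltStep (-2, true)).1

-- ===== PRECONDITION & SPEC =====
def Spec_check_halt (l : List String) (out : Int) : Prop := out = check_halt_alt l
instance (l : List String) (out : Int) : Decidable (Spec_check_halt l out) := by unfold Spec_check_halt; infer_instance

-- ===== CLAIM (what is proved, stated in full; the proofs are below) =====
def Claim_equal_check_halt : Prop := ∀ (l : List String), Dom_check_halt l → Spec_check_halt l (check_halt l)

-- ===== LEMMAS AND PROOFS =====

theorem foldr_snd (l : List String) :
    (l.foldr (fun s acc => checkHaltStep acc s) (-2, true)).2 = l.isEmpty := by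
  cases l <;> simp [checkHaltStep]

theorem loop_eq_foldr (l : List String) : ∀ line : Int,
    checkHaltLoop (line + l.length - 1) l line
      = (l.foldr (fun s acc => checkHaltStep acc s) (-2, true)).1 := by
  induction l with
  | nil => intro line; simp [checkHaltLoop]
  | cons x xs ih =>
    intro line
    have hsnd := foldr_snd xs
    simp only [checkHaltStep] at ih hsnd ⊢
    simp only [List.foldr_cons, hsnd]
    by_cases h : PySem.Str.strip x = "hlt"
    · simp only [checkHaltLoop, h, if_true, List.length_cons]
      cases xs with
      | nil => simp
      | cons y ys =>
        have h2 : line < line + (↑(y :: ys).length + 1) - 1 := by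
          simp only [List.length_cons]; push_cast; omega
        simp [h2]
    · have heq : line + (↑(x :: xs).length : Int) - 1 = (line + 1) + ↑xs.length - 1 := by
        simp only [List.length_cons]; push_cast; ring
      simp only [checkHaltLoop, h, if_false, heq, ih (line + 1)]

-- ===== VERDICT (by name: the statement is the Claim_ definition above) =====
theorem check_halt_spec : Claim_equal_check_halt := by
  intro l _
  unfold Spec_check_halt check_halt check_halt_alt
  rw [List.foldl_reverse]
  have h := loop_eq_foldr l 1
  have : (1 : Int) + l.length - 1 = (l.length : Int) := by ring
  rw [this] at h
  rw [h]
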